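-- pv_equiv track=rewrite | github.com/yelircaasi/nix-config | notes/scripts/fix_links.py | count_word_frequency
-- ===== SOURCE A (Python) =====
-- from itertools import chain
--
-- MIN_FREQ = 3
--
-- def count_word_frequency(
--     lines: list[str],
--     tokens: list[set[str]],
--     min_freq=MIN_FREQ
-- ) -> dict[str, int]:
--     all_tokens = list(chain.from_iterable(tokens))
--     unique = set(all_tokens)
--     counts = {tok: all_tokens.count(tok) for tok in unique}
--     return {k: v for k, v in counts.items() if v > min_freq}
-- ===== SOURCE B (Python) =====
-- MIN_FREQ = 3
--
-- def count_word_frequency(lines, tokens, min_freq=MIN_FREQ):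
--     # Peel-off counting: repeatedly take the first remaining token,
--     # its count is how many elements removing it deletes; filter as we go.
--     remaining = [t for g in tokens for t in g]
--     result = {}
--     while remaining:
--         head = remaining[0]
--         rest = [t for t in remaining[1:] if t != head]
--         if len(remaining) - len(rest) > min_freq:
--             result[head] = len(remaining) - len(rest)
--         remaining = rest
--     return result
-- ===== Notes on version B (the rewrite author's own statement) =====
-- stated objective: alternative
-- what changed: Replaces A's flatten + set() + per-unique-token list.count rescans by a peel-off loop over one shrinking list: take the first remaining token, derive its count from how much filtering it out shrinks the list, filter against min_freq inline.
import Mathlib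
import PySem

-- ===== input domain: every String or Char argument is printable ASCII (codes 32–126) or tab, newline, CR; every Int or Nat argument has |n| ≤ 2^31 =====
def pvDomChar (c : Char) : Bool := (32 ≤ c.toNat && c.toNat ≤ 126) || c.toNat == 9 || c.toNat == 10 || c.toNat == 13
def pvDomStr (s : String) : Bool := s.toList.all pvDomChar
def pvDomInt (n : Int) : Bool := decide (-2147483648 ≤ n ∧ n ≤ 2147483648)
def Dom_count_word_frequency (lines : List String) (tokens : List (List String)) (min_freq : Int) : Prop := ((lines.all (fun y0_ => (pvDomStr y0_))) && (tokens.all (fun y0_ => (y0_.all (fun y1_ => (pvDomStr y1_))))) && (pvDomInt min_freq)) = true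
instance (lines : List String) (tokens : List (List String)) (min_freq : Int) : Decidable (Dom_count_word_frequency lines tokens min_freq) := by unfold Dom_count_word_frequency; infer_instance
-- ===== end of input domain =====

-- B replaces A's flatten + set + per-unique-token rescans by a peel-off loop over one shrinking list (objective: alternative, same asymptotic cost).


-- ===== PORT A =====
-- Port of A: flatten, take the set of unique tokens, count each by a full rescan, filter.
-- (the dict comprehensions are ported as lists of pairs; their keys are the nodup Set.ofList elements)
def count_word_frequency (lines : List String) (tokens : List (List String)) (min_freq : Int) : List (String × Int) :=
  let all_tokens := tokens.flatMap (fun s => s)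
  let unique := PySem.Set.ofList all_tokens
  let counts := unique.map (fun tok => (tok, (PySem.List.count all_tokens tok : Int)))
  counts.filter (fun kv => min_freq < kv.2)

-- ===== PORT B =====
-- B's while loop: peel off the first remaining token; its count is how much
-- filtering it out shrinks the list; record it when above the threshold.
def cwfPeel (min_freq : Int) (remaining : List String) : List (String × Int) :=
  match remaining with
  | [] => []
  | head :: t =>
    let rest := t.filter (fun x => x ≠ head)
    (if min_freq < ((head :: t).length : Int) - (rest.length : Int) then
        [(head, ((head :: t).length : Int) - (rest.length : Int))]
      else []) ++ cwfPeel min_freq rest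
termination_by remaining.length
decreasing_by
  simp only [List.length_cons, List.length_unattach]
  exact Nat.lt_succ_of_le (le_trans (List.length_filter_le _ _) (by simp))

def count_word_frequency_alt (lines : List String) (tokens : List (List String)) (min_freq : Int) : List (String × Int) :=
  cwfPeel min_freq (tokens.flatMap (fun g => g))

-- ===== PRECONDITION & SPEC =====
def Spec_count_word_frequency (lines : List String) (tokens : List (List String)) (min_freq : Int) (out : List (String × Int)) : Prop := out = count_word_frequency_alt lines tokens min_freq
instance (lines : List String) (tokens : List (List String)) (min_freq : Int) (out : List (String × Int)) : Decidable (Spec_count_word_frequency lines tokens min_freq out) := by unfold Spec_count_word_frequency; infer_instance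

-- ===== CLAIM =====
def Claim_equal_count_word_frequency : Prop := ∀ (lines : List String) (tokens : List (List String)) (min_freq : Int), Dom_count_word_frequency lines tokens min_freq → Spec_count_word_frequency lines tokens min_freq (count_word_frequency lines tokens min_freq)

-- ===== LEMMAS AND PROOFS =====

-- Set.add on a set headed by h, for an element ≠ h, commutes with the cons.
theorem set_add_cons_of_ne (s : List String) (h x : String) (hx : x ≠ h) :
    PySem.Set.add (h :: s) x = h :: PySem.Set.add s x := by
  have hc : ((h :: s).contains x) = (s.contains x) := by simp [hx]
  simp only [PySem.Set.add, PySem.Set.contains, hc]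
  split <;> rfl

-- folding adds onto a set headed by h, over elements all ≠ h, keeps h in front.
theorem foldl_add_cons (h : String) (l : List String) (s : List String)
    (hl : ∀ x ∈ l, x ≠ h) :
    l.foldl PySem.Set.add (h :: s) = h :: l.foldl PySem.Set.add s := by
  induction l generalizing s with
  | nil => rfl
  | cons x xs ih =>
    simp only [List.foldl_cons]
    rw [set_add_cons_of_ne s h x (hl x (by simp)), ih _ (fun y hy => hl y (by simp [hy]))]

-- once the set contains h, occurrences of h in the fold's input are skipped.
theorem foldl_add_filter (h : String) (l : List String) (s : List String)
    (hmem : s.contains h = true) :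
    l.foldl PySem.Set.add s = (l.filter (fun x => x ≠ h)).foldl PySem.Set.add s := by
  induction l generalizing s with
  | nil => rfl
  | cons x xs ih =>
    by_cases hx : x = h
    · subst hx
      have hmem' : x ∈ s := by simpa using hmem
      have hadd : PySem.Set.add s x = s := by
        simp [PySem.Set.add, PySem.Set.contains, hmem']
      simp only [List.filter_cons, List.foldl_cons, hadd]
      rw [if_neg (by simp)]
      exact ih s hmem
    · simp only [List.filter_cons, List.foldl_cons]
      rw [if_pos (by simp [hx])]
      simp only [List.foldl_cons]
      refine ih _ ?_
      unfold PySem.Set.add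
      split
      · exact hmem
      · simp only [List.contains_append, hmem, Bool.true_or]

-- ofList of a cons: head first, then ofList of the tail with the head filtered out.
theorem ofList_cons_filter (h : String) (t : List String) :
    PySem.Set.ofList (h :: t) = h :: PySem.Set.ofList (t.filter (fun x => x ≠ h)) := by
  show (h :: t).foldl PySem.Set.add [] = h :: (t.filter (fun x => x ≠ h)).foldl PySem.Set.add []
  simp only [List.foldl_cons]
  have hadd : PySem.Set.add [] h = [h] := rfl
  rw [hadd, foldl_add_filter h t [h] (by simp),
      foldl_add_cons h _ [] (fun x hx => by simpa using (List.of_mem_filter hx))]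

-- length splits into the h-free part and the number of h's.
theorem length_filter_count (h : String) (t : List String) :
    t.length = (t.filter (fun x => x ≠ h)).length + t.count h := by
  induction t with
  | nil => rfl
  | cons x xs ih =>
    by_cases hx : x = h
    · subst hx
      simp only [List.filter_cons, List.count_cons_self, List.length_cons]
      rw [if_neg (by simp)]
      omega
    · simp only [List.filter_cons, List.length_cons]
      rw [if_pos (by simp [hx]), List.count_cons_of_ne hx]
      simp only [List.length_cons]
      omega

-- count of the head equals the length drop caused by filtering it out.
theorem count_head_eq (h : String) (t : List String) :
    ((h :: t).count h : Int) = ((h :: t).length : Int) - ((t.filter (fun x => x ≠ h)).length : Int) := by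
  have := length_filter_count h t
  simp only [List.count_cons_self, List.length_cons]
  omega

-- one unfolding step of the peel-off loop.
theorem cwfPeel_cons (mf : Int) (h : String) (t : List String) :
    cwfPeel mf (h :: t) =
      (if mf < ((h :: t).length : Int) - ((t.filter (fun x => x ≠ h)).length : Int) then
          [(h, ((h :: t).length : Int) - ((t.filter (fun x => x ≠ h)).length : Int))]
        else []) ++ cwfPeel mf (t.filter (fun x => x ≠ h)) := by
  rw [cwfPeel]

-- the peel-off loop computes exactly A's unique-then-count table, filtered
-- (fuel-bounded form for the induction on the shrinking list).
theorem cwfPeel_eq_aux (mf : Int) (n : Nat) :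
    ∀ l : List String, l.length ≤ n →
      cwfPeel mf l =
        ((PySem.Set.ofList l).map (fun tok => (tok, (l.count tok : Int)))).filter
          (fun kv => mf < kv.2) := by
  induction n with
  | zero =>
    intro l hl
    have hnil : l = [] := List.length_eq_zero_iff.mp (Nat.le_zero.mp hl)
    subst hnil
    rw [cwfPeel]
    rfl
  | succ n ih =>
    intro l hl
    cases l with
    | nil => rw [cwfPeel]; rfl
    | cons h t =>
      rw [cwfPeel_cons, ofList_cons_filter]
      simp only [List.map_cons, List.filter_cons]
      rw [ih (t.filter (fun x => x ≠ h))
            (le_trans (List.length_filter_le _ _) (by simpa using Nat.le_of_succ_le_succ hl))]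
      have hmap : (PySem.Set.ofList (t.filter (fun x => x ≠ h))).map
            (fun tok => (tok, (((h :: t).count tok : Int))))
          = (PySem.Set.ofList (t.filter (fun x => x ≠ h))).map
            (fun tok => (tok, (((t.filter (fun x => x ≠ h)).count tok : Int)))) := by
        refine List.map_congr_left fun tok htok => ?_
        have hmem : tok ∈ t.filter (fun x => x ≠ h) := by
          exact (PySem.Set.mem_ofList _ _).mp htok
        have hne : tok ≠ h := by simpa using List.of_mem_filter hmem
        have h1 : (h :: t).count tok = t.count tok := by simp [Ne.symm hne]
        have h2 : (t.filter (fun x => !decide (x = h))).count tok = t.count tok :=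
          List.count_filter (by simp [hne])
        simp [h1, h2]
      rw [← hmap, ← count_head_eq]
      by_cases hc : mf < ((h :: t).count h : Int)
      · rw [if_pos hc, if_pos (by simpa using hc)]
        simp
      · rw [if_neg hc, if_neg (by simpa using hc)]
        simp

-- the peel-off loop computes exactly A's unique-then-count table, filtered.
theorem cwfPeel_eq (mf : Int) (l : List String) :
    cwfPeel mf l =
      ((PySem.Set.ofList l).map (fun tok => (tok, (l.count tok : Int)))).filter
        (fun kv => mf < kv.2) :=
  cwfPeel_eq_aux mf l.length l le_rfl

-- ===== VERDICT =====
theorem count_word_frequency_spec : Claim_equal_count_word_frequency := by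
  intro lines tokens min_freq _
  unfold Spec_count_word_frequency count_word_frequency count_word_frequency_alt
  rw [cwfPeel_eq]
  simp only [PySem.List.count_eq]
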